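-- pv_equiv track=rewrite | github.com/fulmenhq/pyfulmen | src/pyfulmen/docscribe/_formats.py | _is_multi_markdown
-- ===== SOURCE A (Python) =====
-- def _is_multi_markdown(content: str) -> bool:
--     """Check if content is concatenated markdown documents."""
--     # Look for document separators that aren't frontmatter
--     # Pattern: \n---\n followed by content (not at start of doc)
--     lines = content.split("\n")
--
--     # Count separators that are NOT frontmatter
--     separator_count = 0
--     in_frontmatter = False
--
--     for i, line in enumerate(lines):
--         if i == 0 and line.strip() == "---":
--             in_frontmatter = True
--             continue
--
--         if in_frontmatter and line.strip() == "---":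
--             in_frontmatter = False
--             continue
--
--         if not in_frontmatter and line.strip() == "---":
--             # This is a document separator
--             separator_count += 1
--
--     return separator_count >= 1
-- ===== SOURCE B (Python) =====
-- def _is_multi_markdown(content: str) -> bool:
--     """Check if content is concatenated markdown documents."""
--     lines = content.split("\n")
--     dashes = sum(1 for line in lines if line.strip() == "---")
--     # If the document opens with a frontmatter fence, the first two dash
--     # lines (open + close) are not separators; otherwise every dash line is.
--     if lines[0].strip() == "---":
--         return dashes >= 3
--     return dashes >= 1
-- ===== Notes on version B (the rewrite author's own statement) =====
-- stated objective: simpler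
-- what changed: Replaces the enumerate/in_frontmatter state machine with a single count of stripped dash-fence lines, compared against a closed-form threshold (3 when the document opens with a fence, else 1).
import Mathlib
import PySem

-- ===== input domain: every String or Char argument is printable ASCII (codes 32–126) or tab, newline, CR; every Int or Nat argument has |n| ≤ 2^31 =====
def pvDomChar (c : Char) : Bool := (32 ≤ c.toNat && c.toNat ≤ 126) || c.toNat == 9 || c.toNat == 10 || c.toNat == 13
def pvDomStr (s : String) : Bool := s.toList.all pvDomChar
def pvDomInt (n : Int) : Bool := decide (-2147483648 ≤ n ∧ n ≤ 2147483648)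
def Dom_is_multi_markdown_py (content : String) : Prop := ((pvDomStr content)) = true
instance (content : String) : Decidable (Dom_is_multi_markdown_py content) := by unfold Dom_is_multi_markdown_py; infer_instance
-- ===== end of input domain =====

-- B replaces A's in_frontmatter state machine with one count of '---' lines and a closed-form threshold; same cost, simpler.

-- ===== PORT A =====
-- the enumerate loop: state (i, in_frontmatter, separator_count), branches in A's order
def pvAGo : List String → Int → Bool → Int → Int
  | [], _, _, c => c
  | l :: ls, i, fm, c =>
    if i == 0 && PySem.Str.strip l == "---" then pvAGo ls (i + 1) true c
    else if fm && PySem.Str.strip l == "---" then pvAGo ls (i + 1) false c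
    else if !fm && PySem.Str.strip l == "---" then pvAGo ls (i + 1) fm (c + 1)
    else pvAGo ls (i + 1) fm c

def is_multi_markdown_py (content : String) : Bool :=
  let lines := (PySem.Str.split? content "\n").getD []
  decide (pvAGo lines 0 false 0 ≥ 1)

-- ===== PORT B =====
-- lines[0] in Source B: split always returns a nonempty list, so pyGet? 0 with getD "" is exact
def is_multi_markdown_py_alt (content : String) : Bool :=
  let lines := (PySem.Str.split? content "\n").getD []
  let dashes := (lines.filter (fun l => PySem.Str.strip l == "---")).length
  if PySem.Str.strip ((PySem.List.pyGet? lines 0).getD "") == "---" then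
    decide (dashes ≥ 3)
  else
    decide (dashes ≥ 1)

-- ===== PRECONDITION & SPEC =====
def Spec_is_multi_markdown_py (content : String) (out : Bool) : Prop := out = is_multi_markdown_py_alt content
instance (content : String) (out : Bool) : Decidable (Spec_is_multi_markdown_py content out) := by unfold Spec_is_multi_markdown_py; infer_instance

-- ===== CLAIM (what is proved, stated in full; the proofs are below) =====
def Claim_equal_is_multi_markdown_py : Prop := ∀ (content : String), Dom_is_multi_markdown_py content → Spec_is_multi_markdown_py content (is_multi_markdown_py content)

-- ===== LEMMAS AND PROOFS =====

def pvDc (ls : List String) : Nat := (ls.filter (fun l => PySem.Str.strip l == "---")).length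

lemma pvAGo_false (ls : List String) : ∀ (i c : Int), 1 ≤ i →
    pvAGo ls i false c = c + (pvDc ls : Int) := by
  induction ls with
  | nil => intro i c _; simp [pvAGo, pvDc]
  | cons l ls ih =>
    intro i c hi
    have hne : (i == 0) = false := by simp; omega
    by_cases hl : PySem.Str.strip l == "---"
    · simp [pvAGo, hne, hl, ih (i+1) (c+1) (by omega), pvDc]; ring
    · simp [pvAGo, hne, hl, ih (i+1) c (by omega), pvDc]

lemma pvAGo_true (ls : List String) : ∀ (i c : Int), 1 ≤ i →
    pvAGo ls i true c = if pvDc ls = 0 then c else c + (pvDc ls : Int) - 1 := by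
  induction ls with
  | nil => intro i c _; simp [pvAGo, pvDc]
  | cons l ls ih =>
    intro i c hi
    have hne : (i == 0) = false := by simp; omega
    by_cases hl : PySem.Str.strip l == "---"
    · have hd : pvDc (l :: ls) = pvDc ls + 1 := by simp [pvDc, hl]
      rw [show pvAGo (l :: ls) i true c = pvAGo ls (i+1) false c by simp [pvAGo, hne, hl]]
      rw [pvAGo_false ls (i+1) c (by omega), hd]
      split <;> push_cast <;> omega
    · have hd : pvDc (l :: ls) = pvDc ls := by simp [pvDc, hl]
      rw [show pvAGo (l :: ls) i true c = pvAGo ls (i+1) true c by simp [pvAGo, hne, hl]]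
      rw [ih (i+1) c (by omega), hd]

lemma pv_lines_eq (lines : List String) :
    decide (pvAGo lines 0 false 0 ≥ 1) =
      (if PySem.Str.strip ((PySem.List.pyGet? lines 0).getD "") == "---" then
        decide ((lines.filter (fun l => PySem.Str.strip l == "---")).length ≥ 3)
      else
        decide ((lines.filter (fun l => PySem.Str.strip l == "---")).length ≥ 1)) := by
  cases lines with
  | nil => simp [pvAGo, PySem.List.pyGet?, PySem.Str.strip]
  | cons l ls =>
    have h0 : (PySem.List.pyGet? (l :: ls) 0).getD "" = l := by
      simp [PySem.List.pyGet?, PySem.List.pyIdx?]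
    rw [h0]
    by_cases hl : PySem.Str.strip l == "---"
    · rw [show pvAGo (l :: ls) 0 false 0 = pvAGo ls 1 true 0 by simp [pvAGo, hl]]
      rw [pvAGo_true ls 1 0 (by omega)]
      have : ((l :: ls).filter (fun l => PySem.Str.strip l == "---")).length = pvDc ls + 1 := by
        simp [pvDc, hl]
      rw [this]
      simp only [hl, if_true]
      split
      · rename_i h; unfold pvDc at *; rw [decide_eq_decide]; simp [h]
      · rename_i h; unfold pvDc at *; rw [decide_eq_decide]; omega
    · rw [show pvAGo (l :: ls) 0 false 0 = pvAGo ls 1 false 0 by simp [pvAGo, hl]]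
      rw [pvAGo_false ls 1 0 (by omega)]
      have : ((l :: ls).filter (fun l => PySem.Str.strip l == "---")).length = pvDc ls := by
        simp [pvDc, hl]
      rw [this]
      simp only [hl, Bool.false_eq_true, if_false]
      simp only [pvDc]
      rw [decide_eq_decide]; omega

-- ===== VERDICT (by name: the statement is the Claim_ definition above) =====
theorem is_multi_markdown_py_spec : Claim_equal_is_multi_markdown_py := by
  intro content _
  unfold Spec_is_multi_markdown_py is_multi_markdown_py is_multi_markdown_py_alt
  exact pv_lines_eq ((PySem.Str.split? content "\n").getD [])
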